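-- pv_equiv track=rewrite | github.com/ALTA-DE4-ANGGISDC-4n99I/Alterra | Algorithm and Basic Programming/part2_sorting_dan_searching.py | count_item_and_sort
-- ===== SOURCE A (Python) =====
-- def count_item_and_sort(items):
--     item_count = {}
--     for item in items:
--         item_count[item] = item_count.get(item, 0) + 1
--
--     result = ""
--     for item, count in sorted(item_count.items(), key=lambda x: (-x[1], x[0])):
--         result += f"{item}->{count} "
--
--     return result.strip()
-- ===== SOURCE B (Python) =====
-- def count_item_and_sort(items):
--     counts = {}
--     for item in items:
--         counts[item] = counts.get(item, 0) + 1
--     if not counts: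
--         return ""
--     buckets = {}
--     for k, v in counts.items():
--         buckets.setdefault(v, []).append(k)
--     parts = []
--     for count in range(max(counts.values()), 0, -1):
--         for item in sorted(buckets.get(count, [])):
--             parts.append(f"{item}->{count}")
--     return " ".join(parts).strip()
-- ===== Notes on version B (the rewrite author's own statement) =====
-- stated objective: alternative
-- what changed: Replaced A's single compound-key (-count, key) sort of all dict items by a count-bucketed pass: group keys into a count->keys dict in one pass, iterate count from the maximum down to 1, plain-sort only each equal-count bucket, and assemble the output with ' '.join instead of string accumulation.
import Mathlib
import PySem

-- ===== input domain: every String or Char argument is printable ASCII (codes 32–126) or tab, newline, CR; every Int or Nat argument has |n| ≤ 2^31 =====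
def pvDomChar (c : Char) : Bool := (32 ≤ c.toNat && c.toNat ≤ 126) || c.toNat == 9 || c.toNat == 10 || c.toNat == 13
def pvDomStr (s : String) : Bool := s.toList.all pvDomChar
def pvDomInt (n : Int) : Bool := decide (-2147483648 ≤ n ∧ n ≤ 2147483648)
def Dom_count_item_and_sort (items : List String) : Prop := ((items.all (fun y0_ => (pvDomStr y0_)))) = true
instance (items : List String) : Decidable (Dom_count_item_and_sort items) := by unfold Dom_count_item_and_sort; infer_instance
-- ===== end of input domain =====

-- B replaces A's single compound-key (-count, key) sort of all dict items by a count-bucketed pass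
-- (max count down to 1, plain sort of each equal-count bucket) assembled with " ".join — an
-- alternative decomposition, same result.

-- ===== PORT A =====
def count_item_and_sort (items : List String) : String :=
  let item_count := items.foldl (fun d item => d.insert item (d.getD item 0 + 1)) PySem.Dict.empty
  let result := (PySem.List.sorted2 item_count.items (fun x => -x.2) (fun x => x.1)).foldl
    (fun r p => r ++ p.1 ++ "->" ++ PySem.Int.toStr p.2 ++ " ") ""
  PySem.Str.strip result

-- ===== PORT B =====
def count_item_and_sort_alt (items : List String) : String :=
  let counts := items.foldl (fun d item => d.insert item (d.getD item 0 + 1)) PySem.Dict.empty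
  -- python: 'if not counts: return ""' then max(counts.values()); max? = none exactly when the dict is empty
  match PySem.List.max? counts.values (fun v => v) with
  | none => ""
  | some m =>
    -- buckets.setdefault(v, []).append(k) = modify v [] (· ++ [k])
    let buckets := counts.items.foldl (fun d p => d.modify p.2 [] (fun ks => ks ++ [p.1])) PySem.Dict.empty
    let parts := (PySem.List.pyRange m 0 (-1)).foldl (fun parts c =>
      parts ++ (PySem.List.sorted (buckets.getD c []) (fun k => k)).map
        (fun k => k ++ "->" ++ PySem.Int.toStr c)) []
    PySem.Str.strip (PySem.Str.join " " parts)


-- ===== PRECONDITION & SPEC =====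
def Spec_count_item_and_sort (items : List String) (out : String) : Prop := out = count_item_and_sort_alt items
instance (items : List String) (out : String) : Decidable (Spec_count_item_and_sort items out) := by unfold Spec_count_item_and_sort; infer_instance

-- ===== CLAIM (what is proved, stated in full; the proofs are below) =====
def Claim_equal_count_item_and_sort : Prop := ∀ (items : List String), Dom_count_item_and_sort items → Spec_count_item_and_sort items (count_item_and_sort items)

-- ===== LEMMAS AND PROOFS =====
theorem pyRange_down_eq (n : Nat) :
    PySem.List.pyRange (n : Int) 0 (-1) = (List.range n).map (fun k : Nat => (n : Int) + (-1) * (k : Int)) := by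
  unfold PySem.List.pyRange
  norm_num
  rcases Nat.eq_zero_or_pos n with h | h
  · subst h; simp
  · rw [if_pos h]
theorem pyRange_down_succ (n : Nat) :
    PySem.List.pyRange ((n : Int) + 1) 0 (-1) = ((n : Int) + 1) :: PySem.List.pyRange (n : Int) 0 (-1) := by
  have h := pyRange_down_eq (n + 1)
  push_cast at h
  rw [h, pyRange_down_eq n, List.range_succ_eq_map, List.map_cons, List.map_map]
  refine congrArg₂ _ (by push_cast; ring) ?_
  apply List.map_congr_left
  intro k hk
  simp only [Function.comp_apply]
  push_cast
  ring
theorem mem_pyRange_down (n : Nat) (c : Int) (h : c ∈ PySem.List.pyRange (n : Int) 0 (-1)) :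
    1 ≤ c ∧ c ≤ (n : Int) := by
  rw [pyRange_down_eq] at h
  obtain ⟨k, hk, rfl⟩ := List.mem_map.mp h
  have := List.mem_range.mp hk
  omega
theorem pyRange_down_pairwise (n : Nat) :
    (PySem.List.pyRange (n : Int) 0 (-1)).Pairwise (fun a b => b < a) := by
  rw [pyRange_down_eq]
  refine List.Pairwise.map _ ?_ List.pairwise_lt_range
  intro a b hab
  omega

def pvBucket (l : List (String × Int)) (c : Int) : List String :=
  PySem.List.sorted ((l.filter (fun p => p.2 == c)).map (fun p => p.1)) (fun k => k)

def pvBuckets (l : List (String × Int)) (m : Int) : List (String × Int) :=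
  (PySem.List.pyRange m 0 (-1)).flatMap (fun c => (pvBucket l c).map (fun k => (k, c)))

theorem sorted2_eq_sorted_lex (l : List (String × Int)) :
    PySem.List.sorted2 l (fun x => -x.2) (fun x => x.1)
      = PySem.List.sorted l (fun x => (toLex (-x.2, x.1) : Int ×ₗ String)) := by
  unfold PySem.List.sorted2 PySem.List.sorted
  simp only [if_neg (by decide : ¬(false = true))]
  congr 1
  funext acc x
  congr 1
  funext a b
  rcases lt_trichotomy (-a.2) (-b.2) with h | h | h
  · simp [Prod.Lex.toLex_lt_toLex, h, not_lt_of_gt h]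
  · simp [Prod.Lex.toLex_lt_toLex, h]
  · have h1 : ¬(-a.2 < -b.2) := not_lt_of_gt h
    have h2 : a.2 ≠ b.2 := by omega
    have h3 : a.2 < b.2 := by omega
    simp [Prod.Lex.toLex_lt_toLex, h1, h2, h]

theorem bucket_pairs_eq_filter (l : List (String × Int)) (c : Int) :
    ((pvBucket l c).map (fun k => (k, c))).Perm (l.filter (fun p => p.2 == c)) := by
  have h1 : (pvBucket l c).Perm ((l.filter (fun p => p.2 == c)).map (fun p => p.1)) :=
    PySem.List.sorted_perm _ _ _
  have h2 := h1.map (fun k => (k, c))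
  refine h2.trans ?_
  rw [List.map_map]
  have : ∀ p ∈ l.filter (fun p => p.2 == c), ((fun k => (k, c)) ∘ fun p => p.1) p = p := by
    intro p hp
    have := List.of_mem_filter hp
    simp only [beq_iff_eq] at this
    simp [Function.comp, ← this]
  rw [List.map_congr_left this]
  simp

theorem buckets_perm (n : Nat) : ∀ (l : List (String × Int)),
    (∀ p ∈ l, 1 ≤ p.2 ∧ p.2 ≤ (n : Int)) → (pvBuckets l (n : Int)).Perm l := by
  induction n with
  | zero =>
    intro l hl
    have : l = [] := by
      cases l with
      | nil => rfl
      | cons p t => exact absurd (hl p (by simp)) (by norm_num; omega)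
    subst this
    have : PySem.List.pyRange (0 : Int) 0 (-1) = [] := by decide
    simp [pvBuckets, this]
  | succ n ih =>
    intro l hl
    have hr : PySem.List.pyRange ((n : Int) + 1) 0 (-1)
        = ((n : Int) + 1) :: PySem.List.pyRange (n : Int) 0 (-1) := pyRange_down_succ n
    unfold pvBuckets
    push_cast
    rw [hr, List.flatMap_cons]
    set l' := l.filter (fun p => !(p.2 == (n : Int) + 1)) with hl'
    have htail : (PySem.List.pyRange (n : Int) 0 (-1)).flatMap
          (fun c => (pvBucket l c).map (fun k => (k, c)))
        = (PySem.List.pyRange (n : Int) 0 (-1)).flatMap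
          (fun c => (pvBucket l' c).map (fun k => (k, c))) := by
      rw [List.flatMap, List.flatMap]
      congr 1
      apply List.map_congr_left
      intro c hc
      have hcle := (mem_pyRange_down n c hc).2
      have : l'.filter (fun p => p.2 == c) = l.filter (fun p => p.2 == c) := by
        rw [hl', List.filter_filter]
        apply List.filter_congr
        intro p hp
        by_cases h : p.2 = c
        · simp [h]; omega
        · simp [h]
      simp only [pvBucket, this]
    rw [htail]
    have ih' : ((PySem.List.pyRange (n : Int) 0 (-1)).flatMap
        (fun c => (pvBucket l' c).map (fun k => (k, c)))).Perm l' := by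
      apply ih
      intro p hp
      have h1 := List.of_mem_filter hp
      have h2 := List.mem_of_mem_filter hp
      have := hl p h2
      simp only [Bool.not_eq_true', beq_eq_false_iff_ne, ne_eq] at h1
      omega
    refine ((bucket_pairs_eq_filter l ((n : Int) + 1)).append ih').trans ?_
    exact List.filter_append_perm _ l

theorem bucket_nodup (l : List (String × Int)) (c : Int)
    (hnd : (l.map (fun p => p.1)).Nodup) : (pvBucket l c).Nodup := by
  have hsub : ((l.filter (fun p => p.2 == c)).map (fun p => p.1)).Sublist (l.map (fun p => p.1)) :=
    (List.filter_sublist).map _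
  have h1 : ((l.filter (fun p => p.2 == c)).map (fun p => p.1)).Nodup := hsub.nodup hnd
  exact ((PySem.List.sorted_perm _ _ _).nodup_iff).mpr h1

theorem bucket_pairwise_lt (l : List (String × Int)) (c : Int)
    (hnd : (l.map (fun p => p.1)).Nodup) : (pvBucket l c).Pairwise (· < ·) := by
  have h1 : (pvBucket l c).Pairwise (· ≤ ·) := PySem.List.sorted_pairwise _ _
  have h2 := bucket_nodup l c hnd
  exact (h1.and h2).imp (fun h => lt_of_le_of_ne h.1 h.2)

theorem mem_bucket_pairs (l : List (String × Int)) (c : Int) (x : String × Int)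
    (h : x ∈ (pvBucket l c).map (fun k => (k, c))) : x.2 = c := by
  obtain ⟨k, hk, rfl⟩ := List.mem_map.mp h
  rfl

theorem buckets_pairwise (n : Nat) (l : List (String × Int))
    (hnd : (l.map (fun p => p.1)).Nodup) :
    (pvBuckets l (n : Int)).Pairwise
      (fun a b => (toLex (-a.2, a.1) : Int ×ₗ String) < toLex (-b.2, b.1)) := by
  unfold pvBuckets
  rw [List.pairwise_flatMap]
  constructor
  · intro c hc
    refine List.Pairwise.map _ ?_ (bucket_pairwise_lt l c hnd)
    intro a b hab
    rw [Prod.Lex.toLex_lt_toLex]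
    right
    exact ⟨rfl, hab⟩
  · refine (pyRange_down_pairwise n).imp ?_
    intro c1 c2 hgt x hx y hy
    have hx2 := mem_bucket_pairs l c1 x hx
    have hy2 := mem_bucket_pairs l c2 y hy
    rw [Prod.Lex.toLex_lt_toLex]
    left
    simp only [hx2, hy2]
    omega

theorem sorted2_eq_buckets (l : List (String × Int)) (n : Nat)
    (hnd : (l.map (fun p => p.1)).Nodup)
    (hb : ∀ p ∈ l, 1 ≤ p.2 ∧ p.2 ≤ (n : Int)) :
    PySem.List.sorted2 l (fun x => -x.2) (fun x => x.1) = pvBuckets l (n : Int) := by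
  rw [sorted2_eq_sorted_lex]
  exact PySem.List.sorted_eq_of_perm_of_pairwise_lt _ _ _ (buckets_perm n l hb)
    (buckets_pairwise n l hnd)

def pvPart (p : String × Int) : String := p.1 ++ "->" ++ PySem.Int.toStr p.2

theorem foldA_chars (P : List (String × Int)) (acc : String) :
    (P.foldl (fun r p => r ++ p.1 ++ "->" ++ PySem.Int.toStr p.2 ++ " ") acc).toList
      = acc.toList ++ P.flatMap (fun p => (pvPart p).toList ++ [' ']) := by
  induction P generalizing acc with
  | nil => simp
  | cons p t ih =>
    rw [List.foldl_cons, ih, List.flatMap_cons]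
    simp [pvPart, String.toList_append, List.append_assoc]

theorem flatMap_space_eq_intercalate (q : List String) (h : q ≠ []) :
    q.flatMap (fun s => s.toList ++ [' '])
      = List.intercalate [' '] (q.map String.toList) ++ [' '] := by
  induction q with
  | nil => exact absurd rfl h
  | cons x t ih =>
    cases t with
    | nil => simp [List.intercalate]
    | cons y u =>
      rw [List.flatMap_cons, ih (by simp)]
      simp [List.intercalate, List.append_assoc]

theorem strip_append_space (cs : List Char) :
    PySem.Chars.strip (cs ++ [' ']) = PySem.Chars.strip cs := by
  have hsp : PySem.Chars.isspace ' ' = true := by decide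
  have hr : ∀ xs : List Char, PySem.Chars.rstrip (xs ++ [' ']) = PySem.Chars.rstrip xs := by
    intro xs
    unfold PySem.Chars.rstrip
    rw [List.reverse_append]
    simp [hsp]
  unfold PySem.Chars.strip PySem.Chars.lstrip
  rw [List.dropWhile_append]
  by_cases h : (List.dropWhile PySem.Chars.isspace cs).isEmpty = true
  · rw [if_pos h]
    rw [List.isEmpty_iff.mp h]
    simp [hsp, PySem.Chars.rstrip]
  · rw [if_neg h, hr]


theorem buckets_getD (l : List (String × Int)) (c : Int) :
    ((l.foldl (fun d p => d.modify p.2 [] (fun ks => ks ++ [p.1])) PySem.Dict.empty).getD c [])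
      = (l.filter (fun p => p.2 == c)).map (fun p => p.1) := by
  have h : l.foldl (fun d p => d.modify p.2 [] (fun ks => ks ++ [p.1])) PySem.Dict.empty
      = (l.map (fun p => (p.2, p.1))).foldl
          (fun d q => d.modify q.1 [] (fun ks => ks ++ [q.2])) PySem.Dict.empty := by
    rw [List.foldl_map]
  rw [h, PySem.Dict.getD_foldl_modify_append, List.filter_map, List.map_map]
  rfl

theorem main_eq (items : List String) : count_item_and_sort items = count_item_and_sort_alt items := by
  rcases List.eq_nil_or_concat items with hnil | hne
  · subst hnil; rfl
  · have hitems : items ≠ [] := by rcases hne with ⟨a, b, rfl⟩; simp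
    clear hne
    unfold count_item_and_sort count_item_and_sort_alt
    rw [PySem.Dict.foldl_insert_getD_add_one_eq_counter]
    dsimp only
    set d := PySem.Dict.counter items with hd
    set l := d.items with hl
    have hlitems : l = (PySem.Set.ofList items).map (fun k => (k, (items.count k : Int))) := by
      rw [hl, hd, PySem.Dict.items_counter]
    have hofne : PySem.Set.ofList items ≠ [] := by
      obtain ⟨x, hx⟩ := List.exists_mem_of_ne_nil items hitems
      intro hcon
      have := (PySem.Set.mem_ofList items x).mpr hx
      rw [hcon] at this
      exact absurd this (List.not_mem_nil)
    have hlne : l ≠ [] := by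
      rw [hlitems]
      intro hcon
      exact hofne (List.map_eq_nil_iff.mp hcon)
    have hvne : d.values ≠ [] := by
      have : d.values = l.map (fun p => p.2) := rfl
      rw [this]
      intro hcon
      exact hlne (List.map_eq_nil_iff.mp hcon)
    obtain ⟨m, hmax⟩ : ∃ m, PySem.List.max? d.values (fun v => v) = some m := by
      cases hcase : PySem.List.max? d.values (fun v => v) with
      | none => exact absurd ((PySem.List.max?_eq_none_iff _ _).mp hcase) hvne
      | some m => exact ⟨m, rfl⟩
    rw [hmax]
    dsimp only
    simp only [buckets_getD]
    have hm1 : 1 ≤ m := by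
      have hmem := PySem.List.max?_mem hmax
      have : d.values = l.map (fun p => p.2) := rfl
      rw [this, hlitems, List.map_map] at hmem
      obtain ⟨k, hk, rfl⟩ := List.mem_map.mp hmem
      have := (PySem.Set.mem_ofList items k).mp hk
      have := List.count_pos_iff.mpr this
      simp only [Function.comp]
      omega
    have hb : ∀ p ∈ l, 1 ≤ p.2 ∧ p.2 ≤ m := by
      intro p hp
      constructor
      · rw [hlitems] at hp
        obtain ⟨k, hk, rfl⟩ := List.mem_map.mp hp
        have := (PySem.Set.mem_ofList items k).mp hk
        have := List.count_pos_iff.mpr this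
        simp only
        omega
      · have hpv : p.2 ∈ d.values := by
          have : d.values = l.map (fun p => p.2) := rfl
          rw [this]
          exact List.mem_map_of_mem hp
        exact PySem.List.max?_isMax hmax _ hpv
    have hnd : (l.map (fun p => p.1)).Nodup := by
      rw [hlitems, List.map_map]
      have : ((fun p : String × Int => p.1) ∘ fun k => (k, (items.count k : Int))) = id := rfl
      rw [this, List.map_id]
      exact PySem.Set.nodup_ofList items
    have hcast : ((m.toNat : Nat) : Int) = m := Int.toNat_of_nonneg (by omega)
    have hsorted : PySem.List.sorted2 l (fun x => -x.2) (fun x => x.1) = pvBuckets l m := by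
      rw [← hcast]
      exact sorted2_eq_buckets l m.toNat hnd (by rw [hcast]; exact hb)
    rw [hsorted]
    -- B's parts
    rw [PySem.List.foldl_append_eq_flatMap, List.nil_append]
    set q := (pvBuckets l m).map pvPart with hq
    have hparts : (PySem.List.pyRange m 0 (-1)).flatMap
        (fun c => (PySem.List.sorted ((l.filter (fun p => p.2 == c)).map (fun p => p.1))
          (fun k => k)).map (fun k => k ++ "->" ++ PySem.Int.toStr c)) = q := by
      rw [hq]
      unfold pvBuckets
      rw [List.map_flatMap]
      apply List.flatMap_congr
      intro c hc
      rw [List.map_map]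
      rfl
    rw [hparts]
    have hqne : q ≠ [] := by
      rw [hq]
      intro hcon
      have hP := buckets_perm m.toNat l (by rw [hcast]; exact hb)
      rw [hcast] at hP
      have := List.map_eq_nil_iff.mp hcon
      rw [this] at hP
      exact hlne hP.nil_eq.symm
    -- strings
    unfold PySem.Str.strip
    apply congrArg
    have hjoin : (PySem.Str.join " " q).toList = List.intercalate [' '] (q.map String.toList) := by
      unfold PySem.Str.join PySem.Chars.join
      simp
    have hflat : (pvBuckets l m).flatMap (fun p => (pvPart p).toList ++ [' '])
        = q.flatMap (fun s => s.toList ++ [' ']) := by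
      rw [hq, List.flatMap_map]
    rw [foldA_chars, hflat, flatMap_space_eq_intercalate q hqne, hjoin]
    have hemp : ("" : String).toList = [] := rfl
    rw [hemp, List.nil_append]
    exact strip_append_space _

-- ===== VERDICT (by name: the statement is the Claim_ definition above) =====
theorem count_item_and_sort_spec : Claim_equal_count_item_and_sort := by
  intro items _
  unfold Spec_count_item_and_sort
  exact main_eq items
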